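-- pv_equiv track=rewrite | github.com/Yosshi999/ARCGolfVisualizer | app.py | collect_hints
-- ===== SOURCE A (Python) =====
-- def collect_hints(problem):
--     hints = []
--     # all input has same dimensions
--     in_dimensions = set()
--     for p in problem:
--         in_dimensions.add((len(p["input"]), len(p["input"][0])))
--     if len(in_dimensions) == 1:
--         in_dim = in_dimensions.pop()
--         hints.append(f"All inputs have the same dimensions: {in_dim[0]}x{in_dim[1]}")
--     # all output has same dimensions
--     out_dimensions = set()
--     for p in problem:
--         out_dimensions.add((len(p["output"]), len(p["output"][0])))
--     if len(out_dimensions) == 1: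
--         out_dim = out_dimensions.pop()
--         hints.append(f"All outputs have the same dimensions: {out_dim[0]}x{out_dim[1]}")
--     return hints
-- ===== SOURCE B (Python) =====
-- def collect_hints(problem):
--     def uniform_dim(key):
--         # scan once with early exit: the common (rows, cols) or None on first mismatch / empty problem
--         it = iter(problem)
--         try:
--             p = next(it)
--         except StopIteration:
--             return None
--         dim = (len(p[key]), len(p[key][0]))
--         for p in it:
--             if (len(p[key]), len(p[key][0])) != dim:
--                 return None
--         return dim
--
--     hints = []
--     for key, label in (("input", "inputs"), ("output", "outputs")):
--         dim = uniform_dim(key)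
--         if dim is not None:
--             hints.append(f"All {label} have the same dimensions: {dim[0]}x{dim[1]}")
--     return hints
-- ===== Notes on version B (the rewrite author's own statement) =====
-- stated objective: simpler
-- what changed: Replaces the two copy-pasted set-accumulation passes (set.add then len==1/pop) with one generic helper driven by a (key,label) table that scans once per key and returns early on the first dimension mismatch, never building a collection.
import Mathlib
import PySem

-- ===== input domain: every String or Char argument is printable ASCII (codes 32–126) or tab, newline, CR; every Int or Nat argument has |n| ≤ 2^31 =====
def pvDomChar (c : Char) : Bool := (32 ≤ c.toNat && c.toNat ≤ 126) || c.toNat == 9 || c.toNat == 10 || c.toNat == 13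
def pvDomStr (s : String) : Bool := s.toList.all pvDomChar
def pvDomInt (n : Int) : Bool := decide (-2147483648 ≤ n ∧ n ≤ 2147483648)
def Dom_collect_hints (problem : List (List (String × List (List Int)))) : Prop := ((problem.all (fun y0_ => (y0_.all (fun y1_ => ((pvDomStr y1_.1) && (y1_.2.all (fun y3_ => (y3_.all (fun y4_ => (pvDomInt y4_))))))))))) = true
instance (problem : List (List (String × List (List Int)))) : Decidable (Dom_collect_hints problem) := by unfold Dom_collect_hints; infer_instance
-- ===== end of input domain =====

-- B replaces A's two copy-pasted set-accumulation passes with one generic helper, driven by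
-- a (key, label) table, that scans once per key and returns early on the first mismatch (simpler).

-- ===== PORT A =====
def collect_hints (problem : List (List (String × List (List Int)))) : List String :=
  let hints : List String := []
  let in_dimensions : PySem.Set (Int × Int) :=
    problem.foldl (fun s p =>
      let g := (PySem.Dict.mk p).getD "input" []
      PySem.Set.add s ((g.length : Int), (((PySem.List.pyGet? g 0).getD []).length : Int)))
      PySem.Set.empty
  let hints :=
    if in_dimensions.length == 1 then
      -- pop() on a singleton set returns its unique element (the head)
      let in_dim := in_dimensions.headD (0, 0)
      hints ++ ["All inputs have the same dimensions: " ++ PySem.Int.toStr in_dim.1 ++ "x" ++ PySem.Int.toStr in_dim.2]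
    else hints
  let out_dimensions : PySem.Set (Int × Int) :=
    problem.foldl (fun s p =>
      let g := (PySem.Dict.mk p).getD "output" []
      PySem.Set.add s ((g.length : Int), (((PySem.List.pyGet? g 0).getD []).length : Int)))
      PySem.Set.empty
  if out_dimensions.length == 1 then
    let out_dim := out_dimensions.headD (0, 0)
    hints ++ ["All outputs have the same dimensions: " ++ PySem.Int.toStr out_dim.1 ++ "x" ++ PySem.Int.toStr out_dim.2]
  else hints

-- ===== PORT B =====
-- dimension of p[key] exactly as Source B computes it: (len(p[key]), len(p[key][0]))
def pvDimOf (p : List (String × List (List Int))) (key : String) : Int × Int :=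
  let g := (PySem.Dict.mk p).getD key []
  ((g.length : Int), (((PySem.List.pyGet? g 0).getD []).length : Int))

-- the 'for p in it' loop of uniform_dim: early return None on first mismatch
def pvUniformGo (key : String) (dim : Int × Int) :
    List (List (String × List (List Int))) → Option (Int × Int)
  | [] => some dim
  | p :: rest => if pvDimOf p key ≠ dim then none else pvUniformGo key dim rest

-- uniform_dim(key): first element seeds the dimension, rest scanned with early exit
def pvUniformDim (problem : List (List (String × List (List Int)))) (key : String) :
    Option (Int × Int) :=
  match problem with
  | [] => none
  | p :: rest => pvUniformGo key (pvDimOf p key) rest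

def collect_hints_alt (problem : List (List (String × List (List Int)))) : List String :=
  [("input", "inputs"), ("output", "outputs")].foldl (fun hints kl =>
    match pvUniformDim problem kl.1 with
    | some dim => hints ++ ["All " ++ kl.2 ++ " have the same dimensions: " ++
        PySem.Int.toStr dim.1 ++ "x" ++ PySem.Int.toStr dim.2]
    | none => hints) []

-- ===== PRECONDITION & SPEC =====
-- Pre_ excludes only inputs where Python A raises: a mapping without an "input"/"output" key (KeyError)
-- or one whose grid is the empty list (IndexError on grid[0]).
def Pre_collect_hints (problem : List (List (String × List (List Int)))) : Prop :=
  ∀ p ∈ problem, (PySem.Dict.mk p).getD "input" [] ≠ [] ∧ (PySem.Dict.mk p).getD "output" [] ≠ []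
instance (problem : List (List (String × List (List Int)))) : Decidable (Pre_collect_hints problem) := by unfold Pre_collect_hints; infer_instance
def pvWitness_collect_hints : (List (List (String × List (List Int)))) :=
  [[("input", [[1, 2]]), ("output", [[3]])]]
def Spec_collect_hints (problem : List (List (String × List (List Int)))) (out : List String) : Prop := out = collect_hints_alt problem
instance (problem : List (List (String × List (List Int)))) (out : List String) : Decidable (Spec_collect_hints problem out) := by unfold Spec_collect_hints; infer_instance

-- ===== CLAIM (what is proved, stated in full; the proofs are below) =====
def Claim_equal_collect_hints : Prop := ∀ (problem : List (List (String × List (List Int)))), Dom_collect_hints problem → Pre_collect_hints problem → Spec_collect_hints problem (collect_hints problem)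

-- ===== LEMMAS AND PROOFS =====

-- a for-loop adding f p into a set is set(map f problem)
theorem foldl_add_map {α β : Type} [BEq α] (f : β → α) (l : List β) :
    l.foldl (fun s p => PySem.Set.add s (f p)) PySem.Set.empty = PySem.Set.ofList (l.map f) := by
  rw [← PySem.Set.update_map_eq_foldl_add]
  rfl

theorem foldl_add_const {α : Type} [BEq α] [LawfulBEq α] (s : PySem.Set α) (d : α) (l : List α)
    (hall : l.all (fun x => x == d) = true) (hd : PySem.Set.contains s d = true) :
    l.foldl PySem.Set.add s = s := by
  induction l with
  | nil => rfl
  | cons x xs ih =>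
    simp only [List.all_cons, Bool.and_eq_true, beq_iff_eq] at hall
    obtain ⟨hx, hxs⟩ := hall
    subst hx
    simp only [List.foldl_cons, PySem.Set.add, hd, if_pos]
    exact ih hxs

theorem ofList_all_eq_head {α : Type} [BEq α] [LawfulBEq α] (d : α) (rest : List α)
    (hall : rest.all (fun x => x == d) = true) :
    PySem.Set.ofList (d :: rest) = [d] := by
  show (d :: rest).foldl PySem.Set.add PySem.Set.empty = [d]
  have h0 : PySem.Set.add PySem.Set.empty d = [d] := rfl
  rw [List.foldl_cons, h0]
  exact foldl_add_const [d] d rest hall (by simp)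

-- the core bridge: "the accumulated set is a singleton" vs "every element equals the first"
theorem set_singleton_bridge {α β : Type} [BEq α] [LawfulBEq α] (xs : List α) (d0 : α)
    (g : α → List β) (h : List β) :
    (if (PySem.Set.ofList xs).length == 1 then h ++ g ((PySem.Set.ofList xs).headD d0) else h)
    = h ++ (if !xs.isEmpty && xs.all (fun d => d == xs.headD d0) then g (xs.headD d0) else []) := by
  cases xs with
  | nil => simp [PySem.Set.ofList]
  | cons d rest =>
    have hall_cons : (d :: rest).all (fun x => x == d) = rest.all (fun x => x == d) := by
      simp [List.all_cons]
    by_cases hall : rest.all (fun x => x == d) = true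
    · rw [ofList_all_eq_head d rest hall]
      simp [hall_cons, hall]
    · obtain ⟨x, hxmem, hxne⟩ : ∃ x ∈ rest, ¬(x == d) = true := by
        simpa [List.all_eq_true] using hall
      have hne : x ≠ d := by simpa using hxne
      have hlen : ((PySem.Set.ofList (d :: rest)).length == 1) = false := by
        rw [beq_eq_false_iff_ne]
        intro h1
        obtain ⟨y, hy⟩ := List.length_eq_one_iff.mp h1
        have hd : d ∈ PySem.Set.ofList (d :: rest) := by
          rw [PySem.Set.mem_ofList]; exact List.mem_cons_self
        have hx : x ∈ PySem.Set.ofList (d :: rest) := by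
          rw [PySem.Set.mem_ofList]; exact List.mem_cons_of_mem d hxmem
        rw [hy] at hd hx
        simp only [List.mem_singleton] at hd hx
        exact hne (hx.trans hd.symm)
      simp [hlen, hall_cons, hall]

-- the early-exit loop computes "all equal to the seed"
theorem uniformGo_eq (key : String) (d : Int × Int)
    (rest : List (List (String × List (List Int)))) :
    pvUniformGo key d rest =
      (if rest.all (fun p => pvDimOf p key == d) then some d else none) := by
  induction rest with
  | nil => simp [pvUniformGo]
  | cons p ps ih =>
    by_cases hp : pvDimOf p key = d
    · simp [pvUniformGo, hp, ih]
    · simp [pvUniformGo, hp]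

-- uniform_dim characterised on the list of dimensions
theorem uniformDim_char (problem : List (List (String × List (List Int)))) (key : String) :
    pvUniformDim problem key =
      (let xs := problem.map (fun p => pvDimOf p key)
       if !xs.isEmpty && xs.all (fun d => d == xs.headD (0, 0)) then some (xs.headD (0, 0))
       else none) := by
  cases problem with
  | nil => simp [pvUniformDim]
  | cons p rest =>
    rw [show pvUniformDim (p :: rest) key = pvUniformGo key (pvDimOf p key) rest from rfl,
        uniformGo_eq]
    simp only [List.map_cons, List.headD_cons, List.isEmpty_cons, List.all_cons, List.all_map,
      Bool.not_false, Bool.true_and, beq_self_eq_true]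
    by_cases hall : rest.all (fun q => pvDimOf q key == pvDimOf p key) = true
    · simp [hall]
      exact fun x hx => by simpa using List.all_eq_true.mp hall x hx
    · simp [hall]
      rw [List.all_eq_true] at hall
      push Not at hall
      obtain ⟨x, hx, hne⟩ := hall
      exact ⟨x, hx, by simpa using hne⟩

theorem collect_hints_eq (problem : List (List (String × List (List Int)))) :
    collect_hints problem = collect_hints_alt problem := by
  unfold collect_hints collect_hints_alt
  simp only [foldl_add_map]
  rw [set_singleton_bridge (d0 := ((0, 0) : Int × Int)) (g := fun d => ["All inputs have the same dimensions: " ++ PySem.Int.toStr d.1 ++ "x" ++ PySem.Int.toStr d.2]),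
      set_singleton_bridge (d0 := ((0, 0) : Int × Int)) (g := fun d => ["All outputs have the same dimensions: " ++ PySem.Int.toStr d.1 ++ "x" ++ PySem.Int.toStr d.2])]
  simp only [List.foldl_cons, List.foldl_nil, uniformDim_char]
  by_cases hIn : (!(problem.map (fun p => pvDimOf p "input")).isEmpty &&
      (problem.map (fun p => pvDimOf p "input")).all
        (fun d => d == (problem.map (fun p => pvDimOf p "input")).headD (0, 0))) = true <;>
  by_cases hOut : (!(problem.map (fun p => pvDimOf p "output")).isEmpty &&
      (problem.map (fun p => pvDimOf p "output")).all
        (fun d => d == (problem.map (fun p => pvDimOf p "output")).headD (0, 0))) = true <;>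
  simp only [pvDimOf] at hIn hOut ⊢ <;>
  simp only [hIn, hOut] <;>
  simp

-- ===== VERDICT (by name: the statement is the Claim_ definition above) =====
theorem collect_hints_spec : Claim_equal_collect_hints := by
  intro problem _ _
  exact collect_hints_eq problem
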